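-- pv_equiv track=rewrite | github.com/KrzysiekMiskowicz/WDI | Kolos_2019/Kolos_1/Zad_2_2.py | multiple_of_square_of_natural_number
-- ===== SOURCE A (Python) =====
-- def multiple_of_square_of_natural_number(n):
--     divider = 2
--     multiple = 2
--     while divider * divider * 2 <= n:
--         while divider * divider * multiple <= n:
--             if divider * divider * multiple == n:
--                 return True
--             multiple += 1
--
--         multiple = 2
--         divider += 1
--
--     return False
-- ===== SOURCE B (Python) =====
-- def multiple_of_square_of_natural_number(n):
--     d = 2
--     while d * d * 2 <= n:
--         if n % (d * d) == 0:
--             return True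
--         d += 1
--     return False
-- ===== Notes on version B (the rewrite author's own statement) =====
-- stated objective: faster
-- what changed: B replaces A's inner scan over multiples m=2,3,... with a single divisibility test n % (d*d) == 0 per candidate d, turning the nested loops into one loop over d up to sqrt(n/2).
import Mathlib
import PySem

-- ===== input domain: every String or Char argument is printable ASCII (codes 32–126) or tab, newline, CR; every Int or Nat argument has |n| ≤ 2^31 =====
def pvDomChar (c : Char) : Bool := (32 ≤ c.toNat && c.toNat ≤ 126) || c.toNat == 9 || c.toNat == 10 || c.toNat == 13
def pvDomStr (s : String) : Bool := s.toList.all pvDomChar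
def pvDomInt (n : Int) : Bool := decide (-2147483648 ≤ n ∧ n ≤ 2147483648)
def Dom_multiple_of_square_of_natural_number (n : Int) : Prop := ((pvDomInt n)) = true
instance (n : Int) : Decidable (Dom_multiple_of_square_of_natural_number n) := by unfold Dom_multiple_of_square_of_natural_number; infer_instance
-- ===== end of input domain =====

-- B replaces A's inner scan over multiples with a single divisibility test per candidate d (one loop instead of two nested ones; asymptotically faster).


-- ===== PORT A =====
-- inner 'while divider * divider * multiple <= n' loop; hd makes the structural
-- recursion terminate (A only ever calls it with divider ≥ 2)
def pvAInner (n d m : Int) (hd : 1 ≤ d) : Bool :=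
  if h : d * d * m ≤ n then
    if d * d * m = n then true
    else pvAInner n d (m + 1) hd
  else false
termination_by (n + 1 - d * d * m).toNat
decreasing_by
  have hdd : 1 ≤ d * d := by nlinarith
  have : d * d * (m + 1) = d * d * m + d * d := by ring
  omega

-- outer 'while divider * divider * 2 <= n' loop
def pvAOuter (n d : Int) (hd : 1 ≤ d) : Bool :=
  if h : d * d * 2 ≤ n then
    if pvAInner n d 2 hd then true
    else pvAOuter n (d + 1) (by omega)
  else false
termination_by (n + 1 - d * d * 2).toNat
decreasing_by
  have : (d + 1) * (d + 1) * 2 = d * d * 2 + (2 * d + 1) * 2 := by ring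
  omega

def multiple_of_square_of_natural_number (n : Int) : Bool :=
  pvAOuter n 2 (by norm_num)

-- ===== PORT B =====
-- single loop: 'while d * d * 2 <= n: if n % (d*d) == 0: return True; d += 1'
def pvBLoop (n d : Int) (hd : 1 ≤ d) : Bool :=
  if h : d * d * 2 ≤ n then
    if PySem.Int.mod n (d * d) = 0 then true
    else pvBLoop n (d + 1) (by omega)
  else false
termination_by (n + 1 - d * d * 2).toNat
decreasing_by
  have : (d + 1) * (d + 1) * 2 = d * d * 2 + (2 * d + 1) * 2 := by ring
  omega

def multiple_of_square_of_natural_number_alt (n : Int) : Bool :=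
  pvBLoop n 2 (by norm_num)

-- ===== PRECONDITION & SPEC =====
def Spec_multiple_of_square_of_natural_number (n : Int) (out : Bool) : Prop := out = multiple_of_square_of_natural_number_alt n
instance (n : Int) (out : Bool) : Decidable (Spec_multiple_of_square_of_natural_number n out) := by unfold Spec_multiple_of_square_of_natural_number; infer_instance

-- ===== CLAIM (what is proved, stated in full; the proofs are below) =====
def Claim_equal_multiple_of_square_of_natural_number : Prop := ∀ (n : Int), Dom_multiple_of_square_of_natural_number n → Spec_multiple_of_square_of_natural_number n (multiple_of_square_of_natural_number n)

-- ===== LEMMAS AND PROOFS =====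

-- A's inner loop finds whether some multiple k ≥ m satisfies d*d*k = n
theorem pvAInner_iff (n d m : Int) (hd : 1 ≤ d) :
    pvAInner n d m hd = true ↔ ∃ k : Int, m ≤ k ∧ d * d * k = n := by
  fun_induction pvAInner n d m hd with
  | case1 m h heq =>
      simp only [true_iff]
      exact ⟨m, le_refl m, heq⟩
  | case2 m h hne ih =>
      rw [ih]
      constructor
      · rintro ⟨k, hk, hkn⟩; exact ⟨k, by omega, hkn⟩
      · rintro ⟨k, hk, hkn⟩
        refine ⟨k, ?_, hkn⟩
        rcases lt_or_eq_of_le hk with h' | h'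
        · omega
        · exact absurd (h' ▸ hkn) hne
  | case3 m h =>
      simp only [Bool.false_eq_true, false_iff]
      rintro ⟨k, hk, hkn⟩
      have hdd : 1 ≤ d * d := by nlinarith
      nlinarith

-- A's outer loop: true iff some divisor e ≥ d works with some multiple m ≥ 2
theorem pvAOuter_iff (n d : Int) (hd : 1 ≤ d) :
    pvAOuter n d hd = true ↔ ∃ e : Int, d ≤ e ∧ ∃ m : Int, 2 ≤ m ∧ e * e * m = n := by
  fun_induction pvAOuter n d hd with
  | case1 d hd h hin =>
      simp only [true_iff]
      obtain ⟨k, hk, hkn⟩ := (pvAInner_iff n d 2 hd).mp hin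
      exact ⟨d, le_refl d, k, hk, hkn⟩
  | case2 d hd h hin ih =>
      rw [ih]
      constructor
      · rintro ⟨e, he, hm⟩; exact ⟨e, by omega, hm⟩
      · rintro ⟨e, he, m, hm, hmn⟩
        rcases lt_or_eq_of_le he with h' | h'
        · exact ⟨e, by omega, m, hm, hmn⟩
        · exfalso
          exact absurd ((pvAInner_iff n d 2 hd).mpr ⟨m, hm, h' ▸ hmn⟩)
            (by simp [hin])
  | case3 d hd h =>
      simp only [Bool.false_eq_true, false_iff]
      rintro ⟨e, he, m, hm, hmn⟩
      have : d * d ≤ e * e := by nlinarith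
      nlinarith

-- B's loop: same characterization
theorem pvBLoop_iff (n d : Int) (hd : 1 ≤ d) :
    pvBLoop n d hd = true ↔ ∃ e : Int, d ≤ e ∧ ∃ m : Int, 2 ≤ m ∧ e * e * m = n := by
  fun_induction pvBLoop n d hd with
  | case1 d hd h hmod =>
      simp only [true_iff]
      obtain ⟨m, hmn⟩ := (PySem.Int.mod_eq_zero_iff_dvd n (d * d)).mp hmod
      have hdd : 1 ≤ d * d := by nlinarith
      refine ⟨d, le_refl d, m, ?_, hmn.symm⟩
      nlinarith
  | case2 d hd h hmod ih =>
      rw [ih]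
      constructor
      · rintro ⟨e, he, hm⟩; exact ⟨e, by omega, hm⟩
      · rintro ⟨e, he, m, hm, hmn⟩
        rcases lt_or_eq_of_le he with h' | h'
        · exact ⟨e, by omega, m, hm, hmn⟩
        · exfalso
          apply hmod
          exact (PySem.Int.mod_eq_zero_iff_dvd n (d * d)).mpr ⟨m, by rw [← h'] at hmn; omega⟩
  | case3 d hd h =>
      simp only [Bool.false_eq_true, false_iff]
      rintro ⟨e, he, m, hm, hmn⟩
      have : d * d ≤ e * e := by nlinarith
      nlinarith

-- ===== VERDICT (by name: the statement is the Claim_ definition above) =====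
theorem multiple_of_square_of_natural_number_spec : Claim_equal_multiple_of_square_of_natural_number := by
  intro n _
  unfold Spec_multiple_of_square_of_natural_number
  unfold multiple_of_square_of_natural_number multiple_of_square_of_natural_number_alt
  have hA := pvAOuter_iff n 2 (by norm_num)
  have hB := pvBLoop_iff n 2 (by norm_num)
  cases hb : pvBLoop n 2 (by norm_num : (1:Int) ≤ 2)
  · cases ha : pvAOuter n 2 (by norm_num : (1:Int) ≤ 2)
    · rfl
    · exact absurd (hB.mpr (hA.mp ha)) (by simp [hb])
  · rw [hA.mpr (hB.mp hb)]
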